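-- pv_equiv track=rewrite | github.com/kisblilla/interview | firsttask.py | object_area
-- ===== SOURCE A (Python) =====
-- def object_area(input):
--     #check the input numbers
--     towers_heights=input
--     if towers_heights==[] or any(x<1 for x in towers_heights)==True:
--         raise ValueError("The list is empty or there's negative or zero input")
--
--     #check the input towers number
--     towers_number=len(towers_heights)
--     if towers_number == 1:
--         return one_tower(towers_heights)
--     if towers_number>1:
--         return more_tower(towers_heights)
--
-- def one_tower(towers_heights):
--     if towers_heights[0]==1:
--         return 6
--     elif towers_heights[0]==2:
--         return 10
--     else:
--         one_tower_surface = ((towers_heights[0]-2)*4+10)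
--         return (one_tower_surface)
--
-- def more_tower_calculation(n):
--         one_tower_surface = ((n-2)*4+10)
--         return (one_tower_surface)
--
-- def more_tower(towers_heights):
--     connection_surface=0
--     previous=0
--     for i in towers_heights:
--         if i<previous:
--             previous=i
--             connection_surface=connection_surface+i
--         else:
--             connection_surface=connection_surface+previous
--             previous=i
--
--     surface=0
--     for i in towers_heights:
--         surface=surface+more_tower_calculation(i)
--     all_surface=surface-2*connection_surface
--     return all_surface
-- ===== SOURCE B (Python) =====
-- def object_area(input):
--     if input == [] or any(x < 1 for x in input):
--         raise ValueError("The list is empty or there's negative or zero input")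
--     # Geometric decomposition: tops+bottoms, fronts+backs, and the left/right
--     # vertical faces (the two outer walls plus the exposed height steps).
--     sides = input[0] + input[-1] + sum(abs(a - b) for a, b in zip(input, input[1:]))
--     return 2 * len(input) + 2 * sum(input) + sides
-- ===== Notes on version B (the rewrite author's own statement) =====
-- stated objective: simpler
-- what changed: Replaced A's helper dispatch, stateful previous-tracking connection loop and subtraction of shared faces by a direct geometric decomposition: 2*len (tops+bottoms) + 2*sum (fronts+backs) + first + last + sum of absolute adjacent height differences (the exposed left/right walls); nothing shared is ever counted and subtracted.
import Mathlib
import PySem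

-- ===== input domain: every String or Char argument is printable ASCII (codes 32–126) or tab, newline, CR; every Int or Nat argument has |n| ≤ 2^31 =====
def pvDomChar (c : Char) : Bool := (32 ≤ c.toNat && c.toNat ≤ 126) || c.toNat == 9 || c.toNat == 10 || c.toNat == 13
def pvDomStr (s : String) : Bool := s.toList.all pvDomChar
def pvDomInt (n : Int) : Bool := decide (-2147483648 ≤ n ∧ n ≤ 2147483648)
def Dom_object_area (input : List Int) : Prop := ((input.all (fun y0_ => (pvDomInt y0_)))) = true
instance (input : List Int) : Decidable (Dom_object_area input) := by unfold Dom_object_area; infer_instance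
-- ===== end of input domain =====

-- B replaces A's dispatch/connection-surface subtraction by a direct geometric
-- decomposition (tops+bottoms, fronts+backs, endpoints + absolute height steps); objective: simpler.


-- ===== PORT A =====
def oneTower (towers_heights : List Int) : Int :=
  let h := (PySem.List.pyGet? towers_heights 0).getD 0   -- index 0, in range for the lists this is called on
  if h = 1 then 6
  else if h = 2 then 10
  else (h - 2) * 4 + 10

def moreTowerCalculation (n : Int) : Int := (n - 2) * 4 + 10

def moreTower (towers_heights : List Int) : Int :=
  (towers_heights.foldl (fun s i => s + moreTowerCalculation i) 0)
    - 2 * (towers_heights.foldl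
        (fun (s : Int × Int) i => if i < s.2 then (s.1 + i, i) else (s.1 + s.2, i)) (0, 0)).1

def object_area (input : List Int) : Int :=
  if input = [] ∨ input.any (fun x => x < 1) then 0   -- Python raises ValueError here; excluded by Pre_
  else if input.length = 1 then oneTower input
  else if input.length > 1 then moreTower input
  else 0   -- Python falls off and returns None; unreachable (length ≥ 1 here)

-- ===== PORT B =====
def object_area_alt (input : List Int) : Int :=
  if input = [] ∨ input.any (fun x => x < 1) then 0   -- Python raises ValueError here; excluded by Pre_
  else
    let sides := (PySem.List.pyGet? input 0).getD 0 + (PySem.List.pyGet? input (-1)).getD 0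
      + (List.zip input input.tail).foldl (fun s (p : Int × Int) => s + |p.1 - p.2|) 0
    2 * input.length + 2 * input.sum + sides

-- ===== PRECONDITION & SPEC =====
-- Pre_ excludes exactly the inputs where the Python raises ValueError: empty list or any height < 1.
def Pre_object_area (input : List Int) : Prop := input ≠ [] ∧ ∀ x ∈ input, 1 ≤ x
instance (input : List Int) : Decidable (Pre_object_area input) := by unfold Pre_object_area; infer_instance
def pvWitness_object_area : List Int := [3, 1, 2]

def Spec_object_area (input : List Int) (out : Int) : Prop := out = object_area_alt input
instance (input : List Int) (out : Int) : Decidable (Spec_object_area input out) := by unfold Spec_object_area; infer_instance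

-- ===== CLAIM =====
def Claim_equal_object_area : Prop := ∀ (input : List Int), Dom_object_area input → Pre_object_area input → Spec_object_area input (object_area input)

-- ===== LEMMAS AND PROOFS =====

-- sum of minima of adjacent pairs of p :: l (characterises A's connection-surface loop)
def pairSum (p : Int) (l : List Int) : Int :=
  match l with
  | [] => 0
  | x :: xs => min p x + pairSum x xs

theorem connFold_eq_pairSum (l : List Int) (c p : Int) :
    (l.foldl (fun (s : Int × Int) i => if i < s.2 then (s.1 + i, i) else (s.1 + s.2, i)) (c, p)).1
      = c + pairSum p l := by
  induction l generalizing c p with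
  | nil => simp [pairSum]
  | cons x xs ih =>
    simp only [List.foldl_cons, pairSum]
    by_cases h : x < p
    · simp [h, ih, min_def]; omega
    · simp [h, ih, min_def]; omega

theorem surfaceFold (l : List Int) (c : Int) :
    l.foldl (fun s i => s + moreTowerCalculation i) c = c + 4 * l.sum + 2 * l.length := by
  induction l generalizing c with
  | nil => simp
  | cons x xs ih =>
    simp only [List.foldl_cons]
    rw [ih]
    simp [moreTowerCalculation]
    ring

-- sum of absolute differences of adjacent pairs of p :: l (characterises B's zip fold)
def absSum (p : Int) (l : List Int) : Int :=
  match l with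
  | [] => 0
  | x :: xs => |p - x| + absSum x xs

theorem absFold_eq_absSum (x : Int) (xs : List Int) (c : Int) :
    (List.zip (x :: xs) xs).foldl (fun s (p : Int × Int) => s + |p.1 - p.2|) c
      = c + absSum x xs := by
  induction xs generalizing x c with
  | nil => simp [absSum]
  | cons y ys ih =>
    rw [show List.zip (x :: y :: ys) (y :: ys) = (x, y) :: List.zip (y :: ys) ys from rfl]
    simp only [List.foldl_cons, absSum]
    rw [ih]
    ring

-- the bridge: endpoints + absolute steps = 2*sum - 2*(pair minima)
theorem ends_abs_eq (p : Int) (l : List Int) :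
    p + (p :: l).getLast (by simp) + absSum p l = 2 * (p + l.sum) - 2 * pairSum p l := by
  induction l generalizing p with
  | nil => simp [absSum, pairSum]; ring
  | cons y ys ih =>
    have h := ih y
    simp only [absSum, pairSum, List.sum_cons] at *
    rw [show ((p :: y :: ys).getLast (by simp)) = ((y :: ys).getLast (by simp)) from rfl]
    rw [abs_sub_comm] at *
    rcases abs_sub_le_iff.mp (le_refl |y - p|) with _
    rcases le_total p y with h1 | h1
    · rw [abs_of_nonneg (by omega : (0:Int) ≤ y - p), min_eq_left h1]; omega
    · rw [abs_of_nonpos (by omega : y - p ≤ (0:Int)), min_eq_right h1]; omega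

-- ===== VERDICT =====
theorem object_area_spec : Claim_equal_object_area := by
  intro input _ hpre
  obtain ⟨hne, hpos⟩ := hpre
  have hguard : ¬ (input = [] ∨ input.any (fun x => x < 1)) := by
    simp only [not_or]
    refine ⟨hne, ?_⟩
    simp only [List.any_eq_true, not_exists]
    intro x
    rintro ⟨hx, hlt⟩
    have := hpos x hx
    simp at hlt
    omega
  obtain ⟨x, xs, rfl⟩ := List.exists_cons_of_ne_nil hne
  have hx1 : (1 : Int) ≤ x := hpos x (by simp)
  unfold Spec_object_area object_area object_area_alt
  rw [if_neg hguard, if_neg hguard]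
  cases xs with
  | nil =>
    rw [if_pos (show ([x] : List Int).length = 1 from rfl)]
    unfold oneTower
    simp [PySem.List.pyGet?, PySem.List.pyIdx?]
    by_cases h1 : x = 1
    · simp [h1]
    · by_cases h2 : x = 2
      · simp [h2]
      · simp [h1, h2]; ring
  | cons y ys =>
    have hlen : ¬ ((x :: y :: ys).length = 1) := by simp
    have hlen2 : (x :: y :: ys).length > 1 := by simp
    rw [if_neg hlen, if_pos hlen2]
    unfold moreTower
    rw [connFold_eq_pairSum, surfaceFold]
    have htail : (x :: y :: ys).tail = y :: ys := rfl
    rw [htail, absFold_eq_absSum]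
    have hget0 : (PySem.List.pyGet? (x :: y :: ys) 0).getD 0 = x := by
      rw [PySem.List.pyGet?_zero_cons]; rfl
    have hgetl : (PySem.List.pyGet? (x :: y :: ys) (-1)).getD 0
        = (x :: y :: ys).getLast (by simp) := by
      rw [PySem.List.pyGet?_neg_one]
      simp [List.getLast?_eq_some_getLast]
    rw [hget0, hgetl]
    have h0 : pairSum 0 (x :: y :: ys) = pairSum x (y :: ys) := by
      simp [pairSum, min_def]
      intro h; omega
    have hb := ends_abs_eq x (y :: ys)
    rw [h0]
    simp only [List.sum_cons] at *
    omega
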